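-- pv_equiv track=rewrite | github.com/iberi22/CDE-Orchestrator-MCP | scripts/pyrefly_fix_batch.py | fix_unknown_names_in_mcp
-- ===== SOURCE A (Python) =====
-- def fix_unknown_names_in_mcp(content: str) -> str:
--     """Fix unknown names in MCP tool files (false, true, null, typing)"""
--     replacements = [
--         ('"default": false', '"default": False'),
--         ('"default": true', '"default": True'),
--         ('"default": null', '"default": None'),
--         ("typing.List", "List"),
--         ("typing.Dict", "Dict"),
--     ]
--
--     for old, new in replacements:
--         content = content.replace(old, new)
--
--     return content
-- ===== SOURCE B (Python) =====
-- import re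
--
-- def fix_unknown_names_in_mcp(content: str) -> str:
--     """Fix unknown names in MCP tool files (false, true, null, typing)"""
--     # The first four keys never interact (no key or replacement overlaps another key),
--     # so one table-driven pass substitutes them all simultaneously; 'typing.Dict' must be
--     # replaced in a final pass over the combined output, because a 'typing.List' rewrite
--     # can abut the following text to form a new 'typing.Dict' occurrence.
--     mapping = {
--         '"default": false': '"default": False',
--         '"default": true': '"default": True',
--         '"default": null': '"default": None',
--         "typing.List": "List",
--     }
--     pattern = re.compile("|".join(re.escape(old) for old in mapping))
--     return pattern.sub(lambda m: mapping[m.group(0)], content).replace("typing.Dict", "Dict")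
-- ===== Notes on version B (the rewrite author's own statement) =====
-- stated objective: alternative
-- what changed: A runs five sequential full-string str.replace passes; B builds a token->replacement mapping for the four mutually non-interacting keys and substitutes them all in ONE left-to-right pass with a single re.sub over an alternation of the escaped keys, keeping only the final 'typing.Dict' replace as a separate pass over the combined output (a 'typing.List' rewrite can abut following text and form a new 'typing.Dict' occurrence, which A's fifth pass rewrites).
import Mathlib
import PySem

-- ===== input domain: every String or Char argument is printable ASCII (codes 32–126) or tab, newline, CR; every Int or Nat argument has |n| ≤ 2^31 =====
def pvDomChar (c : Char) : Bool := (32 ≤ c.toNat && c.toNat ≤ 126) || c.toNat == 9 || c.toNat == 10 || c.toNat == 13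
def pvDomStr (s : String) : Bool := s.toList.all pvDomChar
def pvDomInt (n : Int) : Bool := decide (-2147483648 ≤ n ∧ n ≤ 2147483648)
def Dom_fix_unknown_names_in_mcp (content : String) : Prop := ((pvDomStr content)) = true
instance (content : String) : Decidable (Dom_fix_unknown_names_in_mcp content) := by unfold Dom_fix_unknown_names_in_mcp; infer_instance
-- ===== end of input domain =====

-- B folds A's first four sequential full-string str.replace passes into ONE left-to-right pass
-- driven by a token table (in Source B: a single re.sub over an alternation of the four literal
-- keys, these four rules never interact), keeping only the final 'typing.Dict' replace as a
-- separate pass over the combined output (a 'typing.List' rewrite can abut following text and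
-- form a new 'typing.Dict' occurrence, which A's fifth pass rewrites); exact equivalence.

-- ===== PORT A =====
def fix_unknown_names_in_mcp (content : String) : String :=
  let content := PySem.Str.replace content "\"default\": false" "\"default\": False"
  let content := PySem.Str.replace content "\"default\": true" "\"default\": True"
  let content := PySem.Str.replace content "\"default\": null" "\"default\": None"
  let content := PySem.Str.replace content "typing.List" "List"
  let content := PySem.Str.replace content "typing.Dict" "Dict"
  content

-- ===== PORT B =====
-- The four tokens of Source B's mapping and their replacements (in insertion order).
def pvT1 : List Char := "\"default\": false".toList
def pvN1 : List Char := "\"default\": False".toList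
def pvT2 : List Char := "\"default\": true".toList
def pvN2 : List Char := "\"default\": True".toList
def pvT3 : List Char := "\"default\": null".toList
def pvN3 : List Char := "\"default\": None".toList
def pvT4 : List Char := "typing.List".toList
def pvN4 : List Char := "List".toList

-- Hand port of Source B's single `re.sub` call (PySem has no regex): re.sub with an alternation of
-- the four escaped literal keys scans left to right, at each position tries the alternatives in
-- the mapping's order, emits the mapped replacement and resumes after the match, otherwise
-- copies one character — exactly this scanner; exact on all inputs.
def pvScan (l : List Char) : List Char :=
  if _h1 : pvT1.isPrefixOf l then pvN1 ++ pvScan (l.drop 16)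
  else if _h2 : pvT2.isPrefixOf l then pvN2 ++ pvScan (l.drop 15)
  else if _h3 : pvT3.isPrefixOf l then pvN3 ++ pvScan (l.drop 15)
  else if _h4 : pvT4.isPrefixOf l then pvN4 ++ pvScan (l.drop 11)
  else match l with
    | [] => []
    | c :: t => c :: pvScan t
termination_by l.length
decreasing_by
  · have := (List.isPrefixOf_iff_prefix.mp _h1).length_le
    simp [pvT1] at this; simp; omega
  · have := (List.isPrefixOf_iff_prefix.mp _h2).length_le
    simp [pvT2] at this; simp; omega
  · have := (List.isPrefixOf_iff_prefix.mp _h3).length_le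
    simp [pvT3] at this; simp; omega
  · have := (List.isPrefixOf_iff_prefix.mp _h4).length_le
    simp [pvT4] at this; simp; omega
  · simp

def fix_unknown_names_in_mcp_alt (content : String) : String :=
  PySem.Str.replace (String.ofList (pvScan content.toList)) "typing.Dict" "Dict"

-- ===== PRECONDITION & SPEC =====
def Spec_fix_unknown_names_in_mcp (content : String) (out : String) : Prop := out = fix_unknown_names_in_mcp_alt content
instance (content : String) (out : String) : Decidable (Spec_fix_unknown_names_in_mcp content out) := by unfold Spec_fix_unknown_names_in_mcp; infer_instance

-- ===== CLAIM (what is proved, stated in full; the proofs are below) =====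
def Claim_equal_fix_unknown_names_in_mcp : Prop := ∀ (content : String), Dom_fix_unknown_names_in_mcp content → Spec_fix_unknown_names_in_mcp content (fix_unknown_names_in_mcp content)

-- ===== LEMMAS AND PROOFS =====

-- Fuel-free model of PySem.Chars.replace (for a non-empty pattern).
def pvRepl (old new : List Char) : List Char → List Char
  | [] => []
  | c :: t =>
    if old.isPrefixOf (c :: t) then new ++ pvRepl old new (t.drop (old.length - 1))
    else c :: pvRepl old new t
termination_by l => l.length
decreasing_by
  · simp
  · simp

theorem pvGo_zero (old new l acc : List Char) :
    PySem.Chars.replace.go old new 0 l acc = acc.reverse ++ l := by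
  rw [PySem.Chars.replace.go]

theorem pvGo_nil (old new : List Char) (n : Nat) (acc : List Char) :
    PySem.Chars.replace.go old new (n + 1) [] acc = acc.reverse := by
  rw [PySem.Chars.replace.go]
  omega

theorem pvGo_cons (old new : List Char) (n : Nat) (c : Char) (t acc : List Char) :
    PySem.Chars.replace.go old new (n + 1) (c :: t) acc =
      if old.isPrefixOf (c :: t) then
        PySem.Chars.replace.go old new n (List.drop old.length (c :: t)) (new.reverse ++ acc)
      else PySem.Chars.replace.go old new n t (c :: acc) := by
  rw [PySem.Chars.replace.go]

theorem pvGo_eq (old new : List Char) (hold : old ≠ []) :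
    ∀ (fuel : Nat) (l acc : List Char), l.length ≤ fuel →
      PySem.Chars.replace.go old new fuel l acc = acc.reverse ++ pvRepl old new l := by
  intro fuel
  induction fuel with
  | zero =>
    intro l acc hl
    have : l = [] := List.eq_nil_of_length_eq_zero (Nat.le_zero.mp hl)
    subst this
    rw [pvGo_zero]; simp [pvRepl]
  | succ n ih =>
    intro l acc hl
    cases l with
    | nil => rw [pvGo_nil]; simp [pvRepl]
    | cons c t =>
      rw [pvGo_cons, pvRepl]
      by_cases hp : old.isPrefixOf (c :: t)
      · rw [if_pos hp, if_pos hp]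
        obtain ⟨o, ot, rfl⟩ := List.exists_cons_of_ne_nil hold
        have hlen : (List.drop (o :: ot).length (c :: t)).length ≤ n := by
          simp at hl ⊢; omega
        rw [ih _ _ hlen]
        simp
      · rw [if_neg hp, if_neg hp]
        have hlen : t.length ≤ n := by simp at hl; omega
        rw [ih _ _ hlen]
        simp

theorem pvReplace_eq (s old new : List Char) (hold : old ≠ []) :
    PySem.Chars.replace s old new = pvRepl old new s := by
  rw [PySem.Chars.replace]
  rw [if_neg (by simpa using hold)]
  simpa using pvGo_eq old new hold s.length s [] le_rfl

theorem pvRepl_nil (old new : List Char) : pvRepl old new [] = [] := by rw [pvRepl]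

theorem pvRepl_prefix (old new s : List Char) (hold : old ≠ []) :
    pvRepl old new (old ++ s) = new ++ pvRepl old new s := by
  obtain ⟨o, ot, rfl⟩ := List.exists_cons_of_ne_nil hold
  rw [List.cons_append, pvRepl]
  rw [if_pos (by simp [List.isPrefixOf_iff_prefix])]
  simp

theorem pvRepl_cons_not_prefix (old new : List Char) (c : Char) (t : List Char)
    (h : ¬ old <+: c :: t) :
    pvRepl old new (c :: t) = c :: pvRepl old new t := by
  rw [pvRepl, if_neg (by simpa [List.isPrefixOf_iff_prefix] using h)]

theorem pvRepl_append_of_head (old new : List Char) :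
    ∀ (x y : List Char), (∀ i, i < x.length → ¬ old <+: (x.drop i ++ y)) →
      pvRepl old new (x ++ y) = x ++ pvRepl old new y := by
  intro x
  induction x with
  | nil => intro y _; simp
  | cons c x' ih =>
    intro y h
    rw [List.cons_append, pvRepl_cons_not_prefix _ _ _ _ (by simpa using h 0 (by simp))]
    rw [ih y (fun i hi => by simpa using h (i + 1) (by simp; omega))]
    simp

theorem pvRepl_append_free (old new x y : List Char)
    (h : ∀ i, i < x.length → ¬ (x.drop i <+: old) ∧ ¬ (old <+: x.drop i)) :
    pvRepl old new (x ++ y) = x ++ pvRepl old new y := by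
  apply pvRepl_append_of_head
  intro i hi hcon
  rcases List.prefix_or_prefix_of_prefix hcon (List.prefix_append _ _) with hc | hc
  · exact (h i hi).2 hc
  · exact (h i hi).1 hc

-- "No creation": a replacement pass cannot make a (nonempty) suffix of tok appear at the head
-- of the output unless it was at the head of the input, provided no nonempty suffix of tok is
-- prefix-comparable with the replacement text.
theorem pvRepl_nc (old new tok : List Char) (hold : old ≠ [])
    (hc : ∀ k, k < tok.length → ¬ (tok.drop k <+: new) ∧ ¬ (new <+: tok.drop k)) :
    ∀ (n : Nat) (l : List Char), l.length ≤ n → ∀ k, k < tok.length →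
      ¬ tok.drop k <+: l → ¬ tok.drop k <+: pvRepl old new l := by
  intro n
  induction n with
  | zero =>
    intro l hl k hk h
    have : l = [] := List.eq_nil_of_length_eq_zero (Nat.le_zero.mp hl)
    subst this; simpa [pvRepl_nil] using h
  | succ n ih =>
    intro l hl k hk h
    cases l with
    | nil => simpa [pvRepl_nil] using h
    | cons c t =>
      by_cases hp : old <+: c :: t
      · obtain ⟨s, hs⟩ := hp
        rw [← hs, pvRepl_prefix _ _ _ hold]
        intro hcon
        rcases List.prefix_or_prefix_of_prefix hcon (List.prefix_append _ _) with hc' | hc'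
        · exact (hc k hk).1 hc'
        · exact (hc k hk).2 hc'
      · rw [pvRepl_cons_not_prefix _ _ _ _ hp]
        intro hcon
        have hdk : tok.drop k = tok[k] :: tok.drop (k + 1) := List.drop_eq_getElem_cons hk
        rw [hdk, List.cons_prefix_cons] at hcon
        obtain ⟨hck, htail⟩ := hcon
        by_cases hk1 : k + 1 < tok.length
        · have hnt : ¬ tok.drop (k + 1) <+: t := by
            intro hx
            exact h (by rw [hdk, List.cons_prefix_cons]; exact ⟨hck, hx⟩)
          exact ih t (by simp at hl; omega) (k + 1) hk1 hnt htail
        · have hnil : tok.drop (k + 1) = [] := List.drop_eq_nil_of_le (by omega)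
          exact h (by rw [hdk, List.cons_prefix_cons, hnil]; exact ⟨hck, List.nil_prefix⟩)

-- specialisation of pvRepl_nc to the head of the string (k = 0)
theorem pvRepl_nc0 (old new tok : List Char) (hold : old ≠ [])
    (hc : ∀ k, k < tok.length → ¬ (tok.drop k <+: new) ∧ ¬ (new <+: tok.drop k))
    (htok : 0 < tok.length) (l : List Char) (h : ¬ tok <+: l) :
    ¬ tok <+: pvRepl old new l := by
  simpa using pvRepl_nc old new tok hold hc l.length l le_rfl 0 htok (by simpa using h)

-- The heart of the claim: A's first four sequential passes agree with B's single scan.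
set_option maxHeartbeats 2000000 in
theorem pvPipe_eq_scan : ∀ (n : Nat) (l : List Char), l.length ≤ n →
    pvRepl pvT4 pvN4 (pvRepl pvT3 pvN3 (pvRepl pvT2 pvN2 (pvRepl pvT1 pvN1 l))) = pvScan l := by
  intro n
  induction n with
  | zero =>
    intro l hl
    have : l = [] := List.eq_nil_of_length_eq_zero (Nat.le_zero.mp hl)
    subst this
    simp [pvScan, pvRepl_nil, pvT1, pvT2, pvT3, pvT4]
  | succ n ih =>
    intro l hl
    by_cases q1 : pvT1 <+: l
    · obtain ⟨rest, rfl⟩ := q1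
      rw [pvRepl_prefix _ _ _ (by decide)]
      rw [pvRepl_append_free pvT2 pvN2 pvN1 _ (by decide)]
      rw [pvRepl_append_free pvT3 pvN3 pvN1 _ (by decide)]
      rw [pvRepl_append_free pvT4 pvN4 pvN1 _ (by decide)]
      rw [pvScan, dif_pos (by simp [List.isPrefixOf_iff_prefix])]
      rw [show (16 : Nat) = pvT1.length by decide, List.drop_left]
      congr 1
      exact ih rest (by simp [pvT1] at hl; omega)
    · by_cases q2 : pvT2 <+: l
      · obtain ⟨rest, rfl⟩ := q2
        rw [pvRepl_append_free pvT1 pvN1 pvT2 _ (by decide)]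
        rw [pvRepl_prefix _ _ _ (by decide)]
        rw [pvRepl_append_free pvT3 pvN3 pvN2 _ (by decide)]
        rw [pvRepl_append_free pvT4 pvN4 pvN2 _ (by decide)]
        rw [pvScan, dif_neg (by simpa [List.isPrefixOf_iff_prefix] using q1),
          dif_pos (by simp [List.isPrefixOf_iff_prefix])]
        rw [show (15 : Nat) = pvT2.length by decide, List.drop_left]
        congr 1
        exact ih rest (by simp [pvT2] at hl; omega)
      · by_cases q3 : pvT3 <+: l
        · obtain ⟨rest, rfl⟩ := q3
          rw [pvRepl_append_free pvT1 pvN1 pvT3 _ (by decide)]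
          rw [pvRepl_append_free pvT2 pvN2 pvT3 _ (by decide)]
          rw [pvRepl_prefix _ _ _ (by decide)]
          rw [pvRepl_append_free pvT4 pvN4 pvN3 _ (by decide)]
          rw [pvScan, dif_neg (by simpa [List.isPrefixOf_iff_prefix] using q1),
            dif_neg (by simpa [List.isPrefixOf_iff_prefix] using q2),
            dif_pos (by simp [List.isPrefixOf_iff_prefix])]
          rw [show (15 : Nat) = pvT3.length by decide, List.drop_left]
          congr 1
          exact ih rest (by simp [pvT3] at hl; omega)
        · by_cases q4 : pvT4 <+: l
          · obtain ⟨rest, rfl⟩ := q4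
            rw [pvRepl_append_free pvT1 pvN1 pvT4 _ (by decide)]
            rw [pvRepl_append_free pvT2 pvN2 pvT4 _ (by decide)]
            rw [pvRepl_append_free pvT3 pvN3 pvT4 _ (by decide)]
            rw [pvRepl_prefix _ _ _ (by decide)]
            rw [pvScan, dif_neg (by simpa [List.isPrefixOf_iff_prefix] using q1),
              dif_neg (by simpa [List.isPrefixOf_iff_prefix] using q2),
              dif_neg (by simpa [List.isPrefixOf_iff_prefix] using q3),
              dif_pos (by simp [List.isPrefixOf_iff_prefix])]
            rw [show (11 : Nat) = pvT4.length by decide, List.drop_left]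
            congr 1
            exact ih rest (by simp [pvT4] at hl; omega)
          · -- no token of the table matches at the head of l
            cases l with
            | nil => simp [pvScan, pvRepl_nil, pvT1, pvT2, pvT3, pvT4]
            | cons c t =>
              have r1e := pvRepl_cons_not_prefix pvT1 pvN1 c t q1
              have nq2 : ¬ pvT2 <+: pvRepl pvT1 pvN1 (c :: t) :=
                pvRepl_nc0 _ _ _ (by decide) (by decide) (by decide) _ q2
              rw [r1e] at nq2
              have r2e := pvRepl_cons_not_prefix pvT2 pvN2 c _ nq2
              have nq3 : ¬ pvT3 <+: pvRepl pvT2 pvN2 (pvRepl pvT1 pvN1 (c :: t)) := by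
                apply pvRepl_nc0 _ _ _ (by decide) (by decide) (by decide)
                exact pvRepl_nc0 _ _ _ (by decide) (by decide) (by decide) _ q3
              rw [r1e, r2e] at nq3
              have r3e := pvRepl_cons_not_prefix pvT3 pvN3 c _ nq3
              have nq4 : ¬ pvT4 <+:
                  pvRepl pvT3 pvN3 (pvRepl pvT2 pvN2 (pvRepl pvT1 pvN1 (c :: t))) := by
                apply pvRepl_nc0 _ _ _ (by decide) (by decide) (by decide)
                apply pvRepl_nc0 _ _ _ (by decide) (by decide) (by decide)
                exact pvRepl_nc0 _ _ _ (by decide) (by decide) (by decide) _ q4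
              rw [r1e, r2e, r3e] at nq4
              have r4e := pvRepl_cons_not_prefix pvT4 pvN4 c _ nq4
              rw [r1e, r2e, r3e, r4e]
              rw [pvScan, dif_neg (by simpa [List.isPrefixOf_iff_prefix] using q1),
                dif_neg (by simpa [List.isPrefixOf_iff_prefix] using q2),
                dif_neg (by simpa [List.isPrefixOf_iff_prefix] using q3),
                dif_neg (by simpa [List.isPrefixOf_iff_prefix] using q4)]
              congr 1
              exact ih t (by simp at hl; omega)

-- ===== VERDICT (by name: the statement is the Claim_ definition above) =====
theorem fix_unknown_names_in_mcp_spec : Claim_equal_fix_unknown_names_in_mcp := by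
  intro content _hdom
  unfold Spec_fix_unknown_names_in_mcp
  apply String.toList_inj.mp
  have hA : (fix_unknown_names_in_mcp content).toList
      = PySem.Chars.replace
          (pvRepl pvT4 pvN4 (pvRepl pvT3 pvN3 (pvRepl pvT2 pvN2 (pvRepl pvT1 pvN1 content.toList))))
          "typing.Dict".toList "Dict".toList := by
    simp only [fix_unknown_names_in_mcp, PySem.Str.toList_replace]
    rw [pvReplace_eq _ ("typing.List".toList) _ (by decide),
      pvReplace_eq _ ("\"default\": null".toList) _ (by decide),
      pvReplace_eq _ ("\"default\": true".toList) _ (by decide),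
      pvReplace_eq _ ("\"default\": false".toList) _ (by decide)]
    rfl
  have hB : (fix_unknown_names_in_mcp_alt content).toList
      = PySem.Chars.replace (pvScan content.toList) "typing.Dict".toList "Dict".toList := by
    simp only [fix_unknown_names_in_mcp_alt, PySem.Str.toList_replace, String.toList_ofList]
  rw [hA, hB, pvPipe_eq_scan content.toList.length content.toList le_rfl]
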